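-- pv_equiv track=rewrite | github.com/zhujoey/Coding | ACSL/Acsl2017-2018Contest2.py | findspots
-- ===== SOURCE A (Python) =====
-- def findspots(expression):
--
--     spots = []
--
--     for i in range(len(expression)):
--
--         j = i + 1
--
--         if expression[i] == "(":
--
--             while j <= len(expression):
--
--                 try:
--
--                     int(expression[j])
--
--                     if j >= i + 3:
--
--                         spots.append(str(j + 2))
--
--                 except:
--
--                     pass
--
--                 j += 1
--
--         elif expression[i] == ")":
--
--             while j >= 1:
--
--                 try:
--
--                     int(expression[j])
--
--                     if j <= i - 1:
--
--                         spots.append(str(j - 1))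
--
--                 except:
--
--                     pass
--
--                 j = j - 1
--
--     return spots
-- ===== SOURCE B (Python) =====
-- def _bisect_left(a, x):
--     lo = 0
--     hi = len(a)
--     while lo < hi:
--         mid = (lo + hi) // 2
--         if a[mid] < x:
--             lo = mid + 1
--         else:
--             hi = mid
--     return lo
--
-- def findspots(expression):
--     # positions of digit characters, in increasing order
--     digits = [p for p, c in enumerate(expression) if c.isdigit()]
--     lo = _bisect_left(digits, 1)  # offsets p - 1 only make sense for p >= 1
--     out = []
--     for i, c in enumerate(expression):
--         if c == "(":
--             k = _bisect_left(digits, i + 3)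
--             out.extend(str(p + 2) for p in digits[k:])
--         elif c == ")":
--             k = _bisect_left(digits, i)
--             out.extend(str(p - 1) for p in reversed(digits[lo:k]))
--     return out
-- ===== Notes on version B (the rewrite author's own statement) =====
-- stated objective: alternative
-- what changed: B precomputes the sorted list of digit positions once and, for each parenthesis, binary-searches the qualifying position range and emits it as a slice, replacing A's per-parenthesis rescan of the whole string under try/except; asymptotically better on parenthesis-dense input, but not measurably faster on the benchmark inputs.
import Mathlib
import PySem

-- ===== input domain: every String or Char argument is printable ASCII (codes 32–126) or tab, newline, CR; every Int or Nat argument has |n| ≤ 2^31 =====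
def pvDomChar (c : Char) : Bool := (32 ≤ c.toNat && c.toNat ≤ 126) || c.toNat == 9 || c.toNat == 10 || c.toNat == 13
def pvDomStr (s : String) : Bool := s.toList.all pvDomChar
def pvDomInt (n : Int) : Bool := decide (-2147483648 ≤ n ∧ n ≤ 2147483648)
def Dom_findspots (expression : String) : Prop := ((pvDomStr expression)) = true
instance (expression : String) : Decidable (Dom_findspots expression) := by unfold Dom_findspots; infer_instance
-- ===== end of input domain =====

-- B replaces A's per-parenthesis rescan of the whole string under try/except by one
-- precomputed digit-position list with a binary search per parenthesis (objective: alternative).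

-- ===== PORT A =====
def findspots (expression : String) : List String :=
  let cs := expression.toList
  let n : Int := PySem.List.len cs
  (PySem.List.pyRange 0 n).foldl (fun spots i =>
    match PySem.List.pyGet? cs i with
    | none => spots
    | some ci =>
      if ci = '(' then
        -- while j <= len(expression): try int(expression[j]) … except pass; j += 1
        (PySem.List.pyRange (i+1) (n+1)).foldl (fun acc j =>
          match (PySem.List.pyGet? cs j).bind (fun c => PySem.Int.ofChars? [c]) with
          | none => acc
          | some _ => if j ≥ i + 3 then acc ++ [PySem.Int.toStr (j+2)] else acc) spots
      else if ci = ')' then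
        -- while j >= 1: try int(expression[j]) … except pass; j -= 1
        (PySem.List.pyRange (i+1) 0 (-1)).foldl (fun acc j =>
          match (PySem.List.pyGet? cs j).bind (fun c => PySem.Int.ofChars? [c]) with
          | none => acc
          | some _ => if j ≤ i - 1 then acc ++ [PySem.Int.toStr (j-1)] else acc) spots
      else spots) []

-- ===== PORT B =====
-- literal port of Source B's hand-written _bisect_left (lo/hi halving loop as recursion on hi - lo);
-- the default 0 in getD is never used: every call keeps mid < hi <= len(a)
def bisectLeftAux (a : List Int) (x : Int) (lo hi : Nat) : Nat :=
  if lo < hi then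
    let mid := (lo + hi) / 2
    if a.getD mid 0 < x then bisectLeftAux a x (mid + 1) hi
    else bisectLeftAux a x lo mid
  else lo
termination_by hi - lo
decreasing_by all_goals omega

def bisectLeftPy (a : List Int) (x : Int) : Nat := bisectLeftAux a x 0 a.length

def findspots_alt (expression : String) : List String :=
  let cs := expression.toList
  let digits : List Int :=
    ((PySem.List.enumerate cs).filter (fun pc => PySem.Chars.isdigit pc.2)).map (fun pc => pc.1)
  let lo : Nat := bisectLeftPy digits 1
  (PySem.List.enumerate cs).foldl (fun out pc =>
    if pc.2 = '(' then
      out ++ (PySem.List.slice digits (some ((bisectLeftPy digits (pc.1 + 3) : Nat) : Int)) none).map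
               (fun p => PySem.Int.toStr (p + 2))
    else if pc.2 = ')' then
      out ++ (PySem.List.slice digits (some ((lo : Int)))
                (some ((bisectLeftPy digits pc.1 : Nat) : Int))).reverse.map
               (fun p => PySem.Int.toStr (p - 1))
    else out) []

-- ===== PRECONDITION & SPEC =====
def Spec_findspots (expression : String) (out : List String) : Prop := out = findspots_alt expression
instance (expression : String) (out : List String) : Decidable (Spec_findspots expression out) := by unfold Spec_findspots; infer_instance

-- ===== CLAIM (what is proved, stated in full; the proofs are below) =====
def Claim_equal_findspots : Prop := ∀ (expression : String), Dom_findspots expression → Spec_findspots expression (findspots expression)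

-- ===== LEMMAS AND PROOFS =====

-- A's digit test at position j: `int(expression[j])` succeeds (no IndexError, no ValueError)
def digA (cs : List Char) (j : Int) : Bool :=
  ((PySem.List.pyGet? cs j).bind (fun c => PySem.Int.ofChars? [c])).isSome

-- the increasing list of digit positions, as A sees them
def dsOf (cs : List Char) : List Int :=
  (PySem.List.pyRange 0 (PySem.List.len cs)).filter (digA cs)

set_option maxRecDepth 10000 in
theorem digit_bridge (c : Char) (h : pvDomChar c = true) :
    (PySem.Int.ofChars? [c]).isSome = PySem.Chars.isdigit c := by
  have hall : ∀ n ∈ List.range 127,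
      (PySem.Int.ofChars? [Char.ofNat n]).isSome = PySem.Chars.isdigit (Char.ofNat n) := by decide
  have h127 : c.toNat < 127 := by
    simp [pvDomChar] at h
    omega
  have := hall c.toNat (List.mem_range.mpr h127)
  rwa [Char.ofNat_toNat] at this

theorem digA_false_of_ge (cs : List Char) (j : Int) (h : (PySem.List.len cs) ≤ j) :
    digA cs j = false := by
  have : PySem.List.pyGet? cs j = none := by
    rw [PySem.List.pyGet?_eq_none_iff]
    intro hr
    rcases hr with ⟨h1, h2⟩
    simp [PySem.List.len] at h
    omega
  simp [digA, this]

theorem ds_pairwise (cs : List Char) : (dsOf cs).Pairwise (· ≤ ·) := by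
  have := PySem.List.pairwise_lt_pyRange_one 0 (PySem.List.len cs)
  exact ((this.filter (digA cs)).imp (fun h => le_of_lt h))

theorem digits_eq (cs : List Char) (h : cs.all pvDomChar = true) :
    ((PySem.List.enumerate cs).filter (fun pc => PySem.Chars.isdigit pc.2)).map (fun pc => pc.1)
      = dsOf cs := by
  rw [PySem.List.enumerate_eq_map_pyRange cs ' ', List.filter_map, List.map_map]
  unfold dsOf
  have : ((fun pc : Int × Char => pc.1) ∘ fun j => (j, PySem.List.pyGetD cs j ' ')) = id := by
    funext j; rfl
  rw [this, List.map_id]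
  apply List.filter_congr
  intro j hj
  rw [PySem.List.mem_pyRange_one] at hj
  have hlen : j < (cs.length : Int) := by
    have := hj.2; simpa [PySem.List.len] using this
  have hget : PySem.List.pyGet? cs j = some cs[j.toNat] :=
    PySem.List.pyGet?_eq_some_getElem cs hj.1 hlen
  have hd : PySem.List.pyGetD cs j ' ' = cs[j.toNat] :=
    PySem.List.pyGetD_eq_getElem cs ' ' hj.1 hlen
  have hmem : cs[j.toNat] ∈ cs := List.getElem_mem _
  have hdomc : pvDomChar cs[j.toNat] = true := (List.all_eq_true.mp h) _ hmem
  simp only [Function.comp, hd, digA, hget, Option.bind_some]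
  exact (digit_bridge _ hdomc).symm

-- widen/narrow a filtered integer range when the predicate is false on the extra parts
theorem filter_pyRange_widen (P : Int → Bool) (a b a' b' : Int)
    (ha : a' ≤ a) (hab : a ≤ b) (hb : b ≤ b')
    (hlow : ∀ j, a' ≤ j → j < a → P j = false)
    (hhigh : ∀ j, b ≤ j → j < b' → P j = false) :
    (PySem.List.pyRange a' b').filter P = (PySem.List.pyRange a b).filter P := by
  rw [PySem.List.pyRange_one_append a' a b' ha (le_trans hab hb),
      PySem.List.pyRange_one_append a b b' hab hb]
  simp only [List.filter_append]
  have h1 : (PySem.List.pyRange a' a).filter P = [] := by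
    rw [List.filter_eq_nil_iff]
    intro x hx
    rw [PySem.List.mem_pyRange_one] at hx
    simp [hlow x hx.1 hx.2]
  have h2 : (PySem.List.pyRange b b').filter P = [] := by
    rw [List.filter_eq_nil_iff]
    intro x hx
    rw [PySem.List.mem_pyRange_one] at hx
    simp [hhigh x hx.1 hx.2]
  simp [h1, h2]

theorem blAux_spec (a : List Int) (x : Int) (n : Nat) : ∀ (lo hi : Nat),
    hi - lo ≤ n → lo ≤ hi → hi ≤ a.length →
    a.Pairwise (· ≤ ·) →
    (∀ (j : Nat) (hj : j < a.length), j < lo → a[j] < x) →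
    (∀ (j : Nat) (hj : j < a.length), hi ≤ j → x ≤ a[j]) →
    bisectLeftAux a x lo hi ≤ a.length ∧
      (∀ (j : Nat) (hj : j < a.length), j < bisectLeftAux a x lo hi → a[j] < x) ∧
      (∀ (j : Nat) (hj : j < a.length), bisectLeftAux a x lo hi ≤ j → x ≤ a[j]) := by
  induction n with
  | zero =>
    intro lo hi hn hlh hhl hp hlo hhi
    have : lo = hi := by omega
    rw [bisectLeftAux, if_neg (by omega)]
    exact ⟨by omega, hlo, fun j hj hge => hhi j hj (by omega)⟩
  | succ n ih =>
    intro lo hi hn hlh hhl hp hlo hhi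
    by_cases hlt : lo < hi
    · have hmid : (lo + hi) / 2 < a.length := by omega
      have hmono : ∀ (p q : Nat) (hp : p < a.length) (hq : q < a.length), p ≤ q → a[p] ≤ a[q] := by
        intro p q hple hq hpq
        rcases Nat.lt_or_ge p q with h | h
        · exact (List.pairwise_iff_getElem.mp hp) p q (by omega) hq h
        · have : p = q := by omega
          subst this; exact le_refl _
      rw [bisectLeftAux, if_pos hlt]
      simp only [List.getD_eq_getElem a 0 hmid]
      by_cases hc : a[(lo + hi) / 2] < x
      · rw [if_pos hc]
        exact ih ((lo + hi) / 2 + 1) hi (by omega) (by omega) hhl hp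
          (by intro j hj hjlt
              exact lt_of_le_of_lt (hmono j ((lo + hi) / 2) hj hmid (by omega)) hc)
          hhi
      · rw [if_neg hc]
        exact ih lo ((lo + hi) / 2) (by omega) (by omega) (by omega) hp hlo
          (by intro j hj hjge
              exact le_trans (le_of_not_gt hc) (hmono ((lo + hi) / 2) j hmid hj hjge))
    · rw [bisectLeftAux, if_neg hlt]
      have : lo = hi := by omega
      exact ⟨by omega, hlo, fun j hj hge => hhi j hj (by omega)⟩

theorem blPy_spec (a : List Int) (x : Int) (hp : a.Pairwise (· ≤ ·)) :
    bisectLeftPy a x ≤ a.length ∧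
      (∀ (j : Nat) (hj : j < a.length), j < bisectLeftPy a x → a[j] < x) ∧
      (∀ (j : Nat) (hj : j < a.length), bisectLeftPy a x ≤ j → x ≤ a[j]) :=
  blAux_spec a x a.length 0 a.length (by omega) (by omega) (le_refl _) hp
    (by intro j hj h; omega) (by intro j hj h; omega)

theorem filter_ge_eq_drop (xs : List Int) (hp : xs.Pairwise (· ≤ ·)) (x : Int) :
    xs.filter (fun p => decide (x ≤ p)) = xs.drop (bisectLeftPy xs x) := by
  obtain ⟨hk, hlt, hge⟩ := blPy_spec xs x hp
  set k := bisectLeftPy xs x with hkdef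
  conv_lhs => rw [← List.take_append_drop k xs]
  rw [List.filter_append]
  have h1 : (xs.take k).filter (fun p => decide (x ≤ p)) = [] := by
    rw [List.filter_eq_nil_iff]
    intro a ha
    rcases List.mem_take_iff_getElem.mp ha with ⟨j, hj, rfl⟩
    have := hlt j (by omega) (by omega)
    simp; omega
  have h2 : (xs.drop k).filter (fun p => decide (x ≤ p)) = xs.drop k := by
    rw [List.filter_eq_self]
    intro a ha
    rcases List.mem_drop_iff_getElem.mp ha with ⟨j, hj, rfl⟩
    have := hge (k + j) (by omega) (by omega)
    simp; omega
  rw [h1, h2]; rfl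

theorem filter_lt_eq_take (ys : List Int) (b : Int) (m : Nat)
    (h1 : ∀ (j : Nat) (hj : j < ys.length), j < m → ys[j] < b)
    (h2 : ∀ (j : Nat) (hj : j < ys.length), m ≤ j → b ≤ ys[j]) :
    ys.filter (fun p => decide (p < b)) = ys.take m := by
  conv_lhs => rw [← List.take_append_drop m ys]
  rw [List.filter_append]
  have ht : (ys.take m).filter (fun p => decide (p < b)) = ys.take m := by
    rw [List.filter_eq_self]
    intro a ha
    rcases List.mem_take_iff_getElem.mp ha with ⟨j, hj, rfl⟩
    have := h1 j (by omega) (by omega)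
    simp; omega
  have hd : (ys.drop m).filter (fun p => decide (p < b)) = [] := by
    rw [List.filter_eq_nil_iff]
    intro a ha
    rcases List.mem_drop_iff_getElem.mp ha with ⟨j, hj, rfl⟩
    have := h2 (m + j) (by omega) (by omega)
    simp; omega
  rw [ht, hd, List.append_nil]

theorem filter_band_eq_slice (xs : List Int) (hp : xs.Pairwise (· ≤ ·)) (a b : Int) :
    xs.filter (fun p => decide (a ≤ p) && decide (p < b))
      = List.take (bisectLeftPy xs b - bisectLeftPy xs a)
          (List.drop (bisectLeftPy xs a) xs) := by
  obtain ⟨hkb, hltb, hgeb⟩ := blPy_spec xs b hp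
  set la := bisectLeftPy xs a with hla
  set lb := bisectLeftPy xs b with hlb
  have hswap : xs.filter (fun p => decide (a ≤ p) && decide (p < b))
      = (xs.filter (fun p => decide (a ≤ p))).filter (fun p => decide (p < b)) := by
    rw [List.filter_filter]
    apply List.filter_congr
    intro x _
    simp [Bool.and_comm]
  rw [hswap, filter_ge_eq_drop xs hp a]
  have hpd : (xs.drop la).Pairwise (· ≤ ·) := hp.sublist (List.drop_sublist la xs)
  apply filter_lt_eq_take
  · intro j hj hjm
    rw [List.getElem_drop]
    exact hltb (la + j) (by simp at hj; omega) (by omega)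
  · intro j hj hjm
    rw [List.getElem_drop]
    exact hgeb (la + j) (by simp at hj; omega) (by omega)

theorem filter_digA_band (cs : List Char) (X : Int → Bool) :
    (PySem.List.pyRange 0 (PySem.List.len cs)).filter (fun j => digA cs j && X j)
      = (dsOf cs).filter X := by
  unfold dsOf
  rw [List.filter_filter]
  apply List.filter_congr
  intro x _
  rw [Bool.and_comm]

theorem open_filter_eq (cs : List Char) (i : Int) (h0 : 0 ≤ i) (h1 : i < PySem.List.len cs) :
    (PySem.List.pyRange (i+1) (PySem.List.len cs + 1)).filter (fun j => digA cs j && decide (i+3 ≤ j))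
      = (dsOf cs).drop (bisectLeftPy (dsOf cs) (i+3)) := by
  have e1 := filter_pyRange_widen (fun j => digA cs j && decide (i+3 ≤ j))
      (i+1) (PySem.List.len cs + 1) 0 (PySem.List.len cs + 1)
      (by omega) (by omega) (by omega)
      (by intro j hj1 hj2
          have : decide (i+3 ≤ j) = false := by simp; omega
          simp [this])
      (by intro j hj1 hj2; omega)
  have e2 := filter_pyRange_widen (fun j => digA cs j && decide (i+3 ≤ j))
      0 (PySem.List.len cs) 0 (PySem.List.len cs + 1)
      (by omega) (by simp [PySem.List.len]) (by omega)
      (by intro j hj1 hj2; omega)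
      (by intro j hj1 hj2; simp [digA_false_of_ge cs j hj1])
  rw [← e1, e2, filter_digA_band, filter_ge_eq_drop _ (ds_pairwise cs)]

theorem close_filter_eq (cs : List Char) (i : Int) (h0 : 0 ≤ i) (h1 : i < PySem.List.len cs) :
    (PySem.List.pyRange (i+1) 0 (-1)).filter (fun j => digA cs j && decide (j ≤ i-1))
      = (PySem.List.slice (dsOf cs)
          (some ((bisectLeftPy (dsOf cs) 1 : Nat) : Int))
          (some ((bisectLeftPy (dsOf cs) i : Nat) : Int))).reverse := by
  rw [PySem.List.pyRange_neg_one_eq_reverse, List.filter_reverse,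
      PySem.List.slice_natCast]
  congr 1
  have hq : (PySem.List.pyRange (0+1) (i+1+1)).filter (fun j => digA cs j && decide (j ≤ i-1))
      = (PySem.List.pyRange 1 (i+2)).filter (fun j => digA cs j && (decide (1 ≤ j) && decide (j < i))) := by
    have h11 : (0+1 : Int) = 1 := by ring
    have h12 : (i+1+1 : Int) = i+2 := by ring
    rw [h11, h12]
    apply List.filter_congr
    intro j hj
    rw [PySem.List.mem_pyRange_one] at hj
    have h2 : decide (j ≤ i-1) = (decide (1 ≤ j) && decide (j < i)) := by
      rcases hj with ⟨hj1, hj2⟩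
      by_cases h : j ≤ i - 1
      · simp [h]; omega
      · simp [h]; omega
    rw [h2]
  rw [hq]
  have hM1 : (i+2 : Int) ≤ max (i+2) (PySem.List.len cs) := le_max_left _ _
  have hM2 : PySem.List.len cs ≤ max (i+2) (PySem.List.len cs) := le_max_right _ _
  have e1 := filter_pyRange_widen (fun j => digA cs j && (decide (1 ≤ j) && decide (j < i)))
      1 (i+2) 0 (max (i+2) (PySem.List.len cs))
      (by omega) (by omega) hM1
      (by intro j hj1 hj2
          have : decide (1 ≤ j) = false := by simp; omega
          simp [this])
      (by intro j hj1 hj2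
          have : decide (j < i) = false := by simp; omega
          simp [this])
  have e2 := filter_pyRange_widen (fun j => digA cs j && (decide (1 ≤ j) && decide (j < i)))
      0 (PySem.List.len cs) 0 (max (i+2) (PySem.List.len cs))
      (by omega) (by omega) hM2
      (by intro j hj1 hj2; omega)
      (by intro j hj1 hj2; simp [digA_false_of_ge cs j hj1])
  rw [← e1, e2, filter_digA_band, filter_band_eq_slice _ (ds_pairwise cs) 1 i]

theorem inner_open (cs : List Char) (i : Int) (h0 : 0 ≤ i) (h1 : i < PySem.List.len cs) (acc : List String) :
    List.foldl (fun acc j =>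
        match (PySem.List.pyGet? cs j).bind (fun c => PySem.Int.ofChars? [c]) with
        | none => acc
        | some _ => if j ≥ i + 3 then acc ++ [PySem.Int.toStr (j+2)] else acc)
      acc (PySem.List.pyRange (i+1) (PySem.List.len cs + 1))
    = acc ++ (PySem.List.slice (dsOf cs)
        (some ((bisectLeftPy (dsOf cs) (i+3) : Nat) : Int)) none).map
        (fun p => PySem.Int.toStr (p + 2)) := by
  rw [PySem.List.foldl_congr_mem _ _
      (fun acc j => if digA cs j && decide (i+3 ≤ j) then acc ++ [PySem.Int.toStr (j+2)] else acc) acc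
      (by intro a j hj
          unfold digA
          cases hb : (PySem.List.pyGet? cs j).bind (fun c => PySem.Int.ofChars? [c]) with
          | none => simp [hb]
          | some v => simp [hb, ge_iff_le])]
  rw [PySem.List.foldl_append_if, open_filter_eq cs i h0 h1,
      PySem.List.slice_from (dsOf cs) (by positivity), Int.toNat_natCast]

theorem inner_close (cs : List Char) (i : Int) (h0 : 0 ≤ i) (h1 : i < PySem.List.len cs) (acc : List String) :
    List.foldl (fun acc j =>
        match (PySem.List.pyGet? cs j).bind (fun c => PySem.Int.ofChars? [c]) with
        | none => acc
        | some _ => if j ≤ i - 1 then acc ++ [PySem.Int.toStr (j-1)] else acc)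
      acc (PySem.List.pyRange (i+1) 0 (-1))
    = acc ++ (PySem.List.slice (dsOf cs)
        (some ((bisectLeftPy (dsOf cs) 1 : Nat) : Int))
        (some ((bisectLeftPy (dsOf cs) i : Nat) : Int))).reverse.map
        (fun p => PySem.Int.toStr (p - 1)) := by
  rw [PySem.List.foldl_congr_mem _ _
      (fun acc j => if digA cs j && decide (j ≤ i-1) then acc ++ [PySem.Int.toStr (j-1)] else acc) acc
      (by intro a j hj
          unfold digA
          cases hb : (PySem.List.pyGet? cs j).bind (fun c => PySem.Int.ofChars? [c]) with
          | none => simp [hb]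
          | some v => simp [hb])]
  rw [PySem.List.foldl_append_if, close_filter_eq cs i h0 h1]

-- ===== VERDICT (by name: the statement is the Claim_ definition above) =====
theorem findspots_spec : Claim_equal_findspots := by
  intro expression hdom
  unfold Spec_findspots
  have hall : expression.toList.all pvDomChar = true := hdom
  simp only [findspots, findspots_alt]
  rw [digits_eq _ hall]
  rw [PySem.List.enumerate_eq_map_pyRange expression.toList ' ', List.foldl_map]
  apply PySem.List.foldl_congr_mem
  intro acc i hi
  rw [PySem.List.mem_pyRange_one] at hi
  have hlen : i < PySem.List.len expression.toList := hi.2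
  have hlen' : i < (expression.toList.length : Int) := by simpa [PySem.List.len] using hlen
  rw [PySem.List.pyGet?_eq_some_getElem expression.toList hi.1 hlen',
      PySem.List.pyGetD_eq_getElem expression.toList ' ' hi.1 hlen']
  by_cases hc1 : expression.toList[i.toNat] = '('
  · rw [hc1]
    simp only [reduceIte]
    exact inner_open expression.toList i hi.1 hlen acc
  · by_cases hc2 : expression.toList[i.toNat] = ')'
    · rw [hc2]
      simp only [reduceIte]
      exact inner_close expression.toList i hi.1 hlen acc
    · simp only [if_neg hc1, if_neg hc2]
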